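-- pv_equiv track=rewrite | github.com/AYEOOON/Algorithm | 프로그래머스/Python/4단계/[2018 KAKAO BLIND RECRUITMENT] - [3차] 자동완성.py | solution
-- ===== SOURCE A (Python) =====
-- def solution(words):
--     answer = 0
--     words.sort()
--
--     def lcp(a, b):
--         length = 0
--         for i in range(min(len(a), len(b))):
--             if a[i] == b[i]:
--                 length += 1
--             else:
--                 break
--         return length
--
--     for i in range(len(words)):
--         prev_count = lcp(words[i], words[i-1]) if i > 0 else 0
--         next_count = lcp(words[i], words[i+1]) if i < len(words)-1 else 0
--         if prev_count == len(words[i]) or next_count == len(words[i]):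
--             answer += len(words[i])
--         else:
--             answer += max(prev_count, next_count)+1
--
--     return answer
-- ===== SOURCE B (Python) =====
-- def solution(words):
--     # Count, for every non-empty prefix, how many words carry it; then each
--     # word costs the length of its shortest uniquely-occurring prefix
--     # (or its full length if none is unique).
--     cnt = {}
--     for w in words:
--         for k in range(1, len(w) + 1):
--             p = w[:k]
--             cnt[p] = cnt.get(p, 0) + 1
--     total = 0
--     for w in words:
--         typed = len(w)
--         for k in range(1, len(w) + 1):
--             if cnt.get(w[:k], 0) == 1:
--                 typed = k
--                 break
--         total += typed
--     return total
-- ===== Notes on version B (the rewrite author's own statement) =====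
-- stated objective: alternative
-- what changed: B drops the sort-and-compare-neighbours scheme entirely: it builds a hash-map counter of every non-empty prefix of every word in one pass, then charges each word the length of its shortest prefix whose count is 1 (full length if none), so no sorting and no pairwise LCP computation remain.
import Mathlib
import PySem

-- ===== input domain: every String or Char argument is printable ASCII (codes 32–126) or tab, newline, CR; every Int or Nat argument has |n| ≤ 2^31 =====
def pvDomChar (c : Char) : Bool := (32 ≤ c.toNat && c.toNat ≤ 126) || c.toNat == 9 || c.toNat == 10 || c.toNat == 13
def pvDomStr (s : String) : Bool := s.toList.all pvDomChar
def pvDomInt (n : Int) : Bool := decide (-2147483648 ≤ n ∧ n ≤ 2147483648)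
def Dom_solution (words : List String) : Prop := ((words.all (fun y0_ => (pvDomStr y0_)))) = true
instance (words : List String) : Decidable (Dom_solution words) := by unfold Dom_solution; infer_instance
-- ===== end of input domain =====

-- B replaces A's sort + neighbour-LCP scan by a counter of all non-empty prefixes
-- (each word costs its shortest prefix with count 1); return values proved equal — note
-- A sorts its list argument in place (a side effect B does not have; the equivalence
-- proved here is about the return value only).


-- ===== PORT A =====
-- A's helper `lcp`: its for/break loop over paired characters, as the obvious structural recursion
def lcpChars : List Char → List Char → Nat
  | a :: as, b :: bs => if a = b then lcpChars as bs + 1 else 0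
  | _, _ => 0

def lcpA (a b : String) : Int := (lcpChars a.toList b.toList : Int)

def solution (words : List String) : Int :=
  let s := PySem.List.sorted words (fun w => w) false
  (PySem.List.pyRange 0 (s.length : Int) 1).foldl (fun answer i =>
    let wi := PySem.List.pyGetD s i ""
    let prevCount := if 0 < i then lcpA wi (PySem.List.pyGetD s (i - 1) "") else 0
    let nextCount := if i < (s.length : Int) - 1 then lcpA wi (PySem.List.pyGetD s (i + 1) "") else 0
    if prevCount = PySem.Str.len wi ∨ nextCount = PySem.Str.len wi then
      answer + PySem.Str.len wi
    else
      answer + max prevCount nextCount + 1) 0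

-- ===== PORT B =====
-- B's inner for/break loop: try k = 1, 2, …; `rem` counts the iterations left
def typedLoop (cnt : PySem.Dict String Int) (w : String) : Nat → Nat → Int
  | 0, _ => PySem.Str.len w
  | rem + 1, k =>
    if cnt.getD (PySem.Str.slice w none (some (k : Int))) 0 = 1 then (k : Int)
    else typedLoop cnt w rem (k + 1)

def solution_alt (words : List String) : Int :=
  let cnt := words.foldl (fun d w =>
    (PySem.List.pyRange 1 (PySem.Str.len w + 1) 1).foldl (fun d k =>
      let p := PySem.Str.slice w none (some k)
      d.insert p (d.getD p 0 + 1)) d) PySem.Dict.empty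
  words.foldl (fun total w => total + typedLoop cnt w w.toList.length 1) 0

-- ===== PRECONDITION & SPEC =====
def Spec_solution (words : List String) (out : Int) : Prop := out = solution_alt words
instance (words : List String) (out : Int) : Decidable (Spec_solution words out) := by unfold Spec_solution; infer_instance

-- ===== CLAIM (what is proved, stated in full; the proofs are below) =====
def Claim_equal_solution : Prop := ∀ (words : List String), Dom_solution words → Spec_solution words (solution words)

-- ===== LEMMAS AND PROOFS =====

theorem lcpChars_le_left (a b : List Char) : lcpChars a b ≤ a.length := by
  induction a generalizing b with
  | nil => simp [lcpChars]
  | cons x as ih =>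
    cases b with
    | nil => simp [lcpChars]
    | cons y bs =>
      simp only [lcpChars]
      split
      · simpa using Nat.succ_le_succ (ih bs)
      · simp

theorem lcpChars_comm (a b : List Char) : lcpChars a b = lcpChars b a := by
  induction a generalizing b with
  | nil => cases b <;> simp [lcpChars]
  | cons x as ih =>
    cases b with
    | nil => simp [lcpChars]
    | cons y bs =>
      simp only [lcpChars]
      by_cases h : x = y
      · subst h; simp [ih]
      · rw [if_neg h, if_neg (fun he => h he.symm)]

-- k ≤ lcp a b  ↔  the first k characters of a form a prefix of b  (for k ≤ |a|)
theorem take_prefix_iff_le_lcp (k : Nat) (a b : List Char) (hk : k ≤ a.length) :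
    a.take k <+: b ↔ k ≤ lcpChars a b := by
  induction k generalizing a b with
  | zero => simp
  | succ k ih =>
    cases a with
    | nil => simp at hk
    | cons x as =>
      cases b with
      | nil =>
        have h0 : lcpChars (x :: as) [] = 0 := rfl
        constructor
        · intro h
          have := List.prefix_nil.mp h
          simp [List.take_succ_cons] at this
        · intro h; omega
      | cons y bs =>
        simp only [List.take_succ_cons, lcpChars, List.cons_prefix_cons]
        constructor
        · rintro ⟨rfl, hp⟩
          rw [if_pos rfl]
          have := (ih as bs (by simpa using hk)).mp hp
          omega
        · intro h
          split at h
          · next heq => exact ⟨heq, (ih as bs (by simpa using hk)).mpr (by omega)⟩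
          · omega

-- lexicographic monotonicity: a ≤ b ≤ c pinches lcp a c below both adjacent lcps
theorem lcp_min_mono (a b c : List Char) (h1 : List.Lex (· < ·) a b ∨ a = b)
    (h2 : List.Lex (· < ·) b c ∨ b = c) :
    lcpChars a c ≤ min (lcpChars a b) (lcpChars b c) := by
  induction a generalizing b c with
  | nil => simp [lcpChars]
  | cons x as ih =>
    cases c with
    | nil => simp [lcpChars]
    | cons z cs =>
      by_cases hxz : x = z
      · subst hxz
        cases b with
        | nil =>
          rcases h1 with h1 | h1
          · cases h1
          · simp at h1
        | cons y bs =>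
          have hxy : x = y ∧ (List.Lex (· < ·) as bs ∨ as = bs) := by
            rcases h1 with h1 | h1
            · cases h1 with
              | cons h => exact ⟨rfl, Or.inl h⟩
              | rel h =>
                exfalso
                rcases h2 with h2 | h2
                · cases h2 with
                  | cons h' => exact absurd h (lt_irrefl _)
                  | rel h' => exact absurd (lt_trans h h') (lt_irrefl _)
                · injection h2 with h2a h2b; subst h2a; exact absurd h (lt_irrefl _)
            · injection h1 with h1a h1b; subst h1a; subst h1b; exact ⟨rfl, Or.inr rfl⟩
          obtain ⟨rfl, hab⟩ := hxy
          have hbc : List.Lex (· < ·) bs cs ∨ bs = cs := by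
            rcases h2 with h2 | h2
            · cases h2 with
              | cons h => exact Or.inl h
              | rel h => exact absurd h (lt_irrefl _)
            · injection h2 with h2a h2b; exact Or.inr h2b
          have := ih bs cs hab hbc
          simp [lcpChars]
          omega
      · simp only [lcpChars, if_neg hxz]; omega

theorem le_lex (a b : String) (h : a ≤ b) :
    List.Lex (· < ·) a.toList b.toList ∨ a.toList = b.toList := by
  rcases lt_or_eq_of_le h with hlt | heq
  · exact Or.inl ((List.lt_iff_lex_lt _ _).mp (String.lt_iff_toList_lt.mp hlt))
  · exact Or.inr (congrArg String.toList heq)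

-- a list element satisfying p is the only one iff countP = 1
theorem countP_eq_one_iff {α : Type} (l : List α) (p : α → Bool) (i : Nat) (hi : i < l.length)
    (hpi : p l[i] = true) :
    l.countP p = 1 ↔ ∀ j, (hj : j < l.length) → j ≠ i → p l[j] = false := by
  have hdec : l.countP p = (l.take i).countP p + ((l.drop (i+1)).countP p + 1) := by
    calc l.countP p = (l.take i).countP p + (l.drop i).countP p := by
          rw [← List.countP_append, List.take_append_drop]
      _ = (l.take i).countP p + ((l.drop (i+1)).countP p + 1) := by
          rw [List.drop_eq_getElem_cons hi, List.countP_cons, hpi]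
          simp
  constructor
  · intro h1 j hj hne
    have h0 : (l.take i).countP p = 0 ∧ (l.drop (i+1)).countP p = 0 := by omega
    by_contra hp
    have hpj : p l[j] = true := by simpa using hp
    rcases Nat.lt_or_ge j i with hji | hji
    · have hmem : l[j] ∈ l.take i := by
        have hl : j < (l.take i).length := by simp [List.length_take]; omega
        have : (l.take i)[j] = l[j] := List.getElem_take
        exact this ▸ List.getElem_mem hl
      have := List.countP_eq_zero.mp h0.1 _ hmem
      simp [hpj] at this
    · have hji' : i + 1 ≤ j := by omega
      have hmem : l[j] ∈ l.drop (i+1) := by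
        rw [List.mem_iff_getElem]
        refine ⟨j - (i+1), by simp [List.length_drop]; omega, ?_⟩
        rw [List.getElem_drop]
        congr 1
        omega
      have := List.countP_eq_zero.mp h0.2 _ hmem
      simp [hpj] at this
  · intro h2
    have h0a : (l.take i).countP p = 0 := by
      apply List.countP_eq_zero.mpr
      intro x hx
      obtain ⟨j, hj, hjx⟩ := List.mem_iff_getElem.mp hx
      have hjl : j < i := by simp [List.length_take] at hj; omega
      have : (l.take i)[j] = l[j]'(by omega) := List.getElem_take
      rw [this] at hjx
      subst hjx
      simpa using h2 j (by omega) (by omega)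
    have h0b : (l.drop (i+1)).countP p = 0 := by
      apply List.countP_eq_zero.mpr
      intro x hx
      obtain ⟨j, hj, hjx⟩ := List.mem_iff_getElem.mp hx
      have hjl : i + 1 + j < l.length := by simp [List.length_drop] at hj; omega
      have : (l.drop (i+1))[j] = l[(i+1) + j]'hjl := List.getElem_drop
      rw [this] at hjx
      subst hjx
      simpa using h2 _ hjl (by omega)
    omega

-- ---- B's counter characterised ----

def prefList (w : String) : List String :=
  (PySem.List.pyRange 1 (PySem.Str.len w + 1) 1).map (fun k => PySem.Str.slice w none (some k))

theorem prefList_eq_map_range (w : String) :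
    prefList w = (List.range w.toList.length).map
      (fun (j : Nat) => PySem.Str.slice w none (some (1 + (j : Int)))) := by
  unfold prefList
  rw [PySem.Str.len_eq, PySem.List.pyRange_one, List.map_map]
  have h : ((w.toList.length : Int) + 1 - 1).toNat = w.toList.length := by omega
  rw [h]
  rfl

theorem toList_slice_take (w : String) (j : Nat) :
    (PySem.Str.slice w none (some (1 + (j : Int)))).toList = w.toList.take (1 + j) := by
  rw [PySem.Str.toList_slice, PySem.Chars.slice_eq_listSlice]
  rw [show (1 + (j : Int)) = ((1 + j : Nat) : Int) by omega]
  rw [PySem.List.slice_to_natCast]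

theorem toList_slice_take' (w : String) (k : Nat) :
    (PySem.Str.slice w none (some (k : Int))).toList = w.toList.take k := by
  rw [PySem.Str.toList_slice, PySem.Chars.slice_eq_listSlice, PySem.List.slice_to_natCast]

theorem count_prefList (w p : String) (hp : p.toList ≠ []) :
    (prefList w).count p = if p.toList <+: w.toList then 1 else 0 := by
  rw [prefList_eq_map_range, List.count_eq_countP, List.countP_map]
  have hstep : ∀ j ∈ List.range w.toList.length,
      ((fun x => x == p) ∘ fun (j : Nat) => PySem.Str.slice w none (some (1 + (j : Int)))) j
      = decide (w.toList.take (1 + j) = p.toList) := by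
    intro j _
    simp only [Function.comp]
    by_cases h : w.toList.take (1 + j) = p.toList
    · have he : PySem.Str.slice w none (some (1 + (j : Int))) = p :=
        String.toList_inj.mp (by rw [toList_slice_take]; exact h)
      simp [he, h]
    · have he : PySem.Str.slice w none (some (1 + (j : Int))) ≠ p :=
        fun he => h (by rw [← toList_slice_take w j, he])
      simp [he, h]
  rw [List.countP_congr (fun j hj => by rw [hstep j hj])]
  have hlp : p.toList.length = p.length := String.length_toList
  have hlw : w.toList.length = w.length := String.length_toList
  by_cases hpre : p.toList <+: w.toList
  · rw [if_pos hpre]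
    have hk0 : 1 ≤ p.toList.length := by
      cases hl : p.toList with
      | nil => exact absurd hl hp
      | cons a t => simp
    have hk0L : p.toList.length ≤ w.toList.length := hpre.length_le
    have heq : ∀ j ∈ List.range w.toList.length,
        decide (w.toList.take (1 + j) = p.toList) = (j == p.toList.length - 1) := by
      intro j hj
      rw [List.mem_range] at hj
      by_cases hjk : j = p.toList.length - 1
      · subst hjk
        have h1 : 1 + (p.toList.length - 1) = p.toList.length := by omega
        rw [h1]
        have ht := List.prefix_iff_eq_take.mp hpre
        simp only [beq_self_eq_true]
        exact decide_eq_true ht.symm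
      · have hne : ¬ (w.toList.take (1 + j) = p.toList) := by
          intro he
          have hlen := congrArg List.length he
          rw [List.length_take] at hlen
          omega
        simp [hne]
        omega
    rw [List.countP_congr (fun j hj => by rw [heq j hj])]
    rw [← List.count_eq_countP, List.count_range]
    rw [if_pos (by omega)]
  · rw [if_neg hpre]
    apply List.countP_eq_zero.mpr
    intro j hj
    simp only [decide_eq_true_eq]
    intro he
    exact hpre (he ▸ List.take_prefix (1 + j) w.toList)

def cntOf (words : List String) : PySem.Dict String Int :=
  PySem.Dict.counter (words.flatMap prefList)

theorem cnt_port_eq (words : List String) :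
    words.foldl (fun d w =>
      (PySem.List.pyRange 1 (PySem.Str.len w + 1) 1).foldl (fun d k =>
        let p := PySem.Str.slice w none (some k)
        d.insert p (d.getD p 0 + 1)) d) PySem.Dict.empty = cntOf words := by
  unfold cntOf
  rw [← PySem.Dict.foldl_insert_getD_add_one_eq_counter, List.foldl_flatMap]
  apply PySem.List.foldl_congr_mem
  intro d w _
  unfold prefList
  rw [List.foldl_map]

theorem getD_cntOf (words : List String) (p : String) (hp : p.toList ≠ []) :
    (cntOf words).getD p 0 =
      ((words.countP (fun w => decide (p.toList <+: w.toList)) : Nat) : Int) := by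
  unfold cntOf
  rw [PySem.Dict.getD_counter]
  congr 1
  rw [List.count_eq_countP, List.countP_flatMap]
  have h1 : words.map (List.countP (fun x => x == p) ∘ prefList)
      = words.map (fun w => if decide (p.toList <+: w.toList) = true then 1 else 0) := by
    apply List.map_congr_left
    intro w _
    simp only [Function.comp]
    rw [← List.count_eq_countP, count_prefList w p hp]
    simp
  rw [h1, PySem.List.sum_map_ite_one_zero_nat]

-- ---- the sorted list, neighbour lcps, and the common per-word value ----

def prevN (s : List String) (i : Nat) : Nat :=
  if 0 < i then lcpChars (s.getD i "").toList (s.getD (i-1) "").toList else 0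

def nextN (s : List String) (i : Nat) : Nat :=
  if i + 1 < s.length then lcpChars (s.getD i "").toList (s.getD (i+1) "").toList else 0

def mN (s : List String) (i : Nat) : Nat := max (prevN s i) (nextN s i)

def Aterm (s : List String) (i : Nat) : Int :=
  if mN s i + 1 ≤ (s.getD i "").toList.length
  then ((mN s i + 1 : Nat) : Int) else ((s.getD i "").toList.length : Int)

theorem mN_le_len (s : List String) (i : Nat) : mN s i ≤ (s.getD i "").toList.length := by
  unfold mN prevN nextN
  have h1 := lcpChars_le_left (s.getD i "").toList (s.getD (i-1) "").toList
  have h2 := lcpChars_le_left (s.getD i "").toList (s.getD (i+1) "").toList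
  split_ifs <;> omega

-- every other word's lcp with word i is bounded by a neighbour's lcp, on the sorted list
theorem lcp_le_mN (words : List String) (i j : Nat)
    (hi : i < (PySem.List.sorted words (fun w => w) false).length)
    (hj : j < (PySem.List.sorted words (fun w => w) false).length) (hne : j ≠ i) :
    lcpChars ((PySem.List.sorted words (fun w => w) false).getD i "").toList
      ((PySem.List.sorted words (fun w => w) false).getD j "").toList
      ≤ mN (PySem.List.sorted words (fun w => w) false) i := by
  set s := PySem.List.sorted words (fun w => w) false with hs
  have hgd : ∀ t (ht : t < s.length), s.getD t "" = s[t]'ht :=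
    fun t ht => List.getD_eq_getElem s "" ht
  have hlen2 : (PySem.List.sorted words (fun w => w) false).length = s.length := by rw [hs]
  rcases Nat.lt_or_ge j i with hlt | hge
  · -- j < i : bound through the left neighbour i-1
    have h1 : s[j]'(by omega) ≤ s[i-1]'(by omega) := by
      exact PySem.List.sorted_id_getElem_mono words (by omega) (by omega)
    have h2 : s[i-1]'(by omega) ≤ s[i]'hi := by
      exact PySem.List.sorted_id_getElem_mono words (by omega) (by omega)
    have hmin := lcp_min_mono _ _ _ (le_lex _ _ h1) (le_lex _ _ h2)
    have hprev : prevN s i = lcpChars (s.getD i "").toList (s.getD (i-1) "").toList := by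
      unfold prevN; rw [if_pos (by omega)]
    have : lcpChars (s.getD i "").toList (s.getD j "").toList
        ≤ lcpChars (s.getD i "").toList (s.getD (i-1) "").toList := by
      rw [hgd i hi, hgd j (by omega), hgd (i-1) (by omega)]
      rw [lcpChars_comm ((s[i]'hi).toList)]
      rw [lcpChars_comm ((s[i]'hi).toList)]
      omega
    unfold mN
    omega
  · have hgt : i + 1 ≤ j := by omega
    have h1 : s[i]'hi ≤ s[i+1]'(by omega) := by
      exact PySem.List.sorted_id_getElem_mono words (by omega) (by omega)
    have h2 : s[i+1]'(by omega) ≤ s[j]'hj := by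
      exact PySem.List.sorted_id_getElem_mono words (by omega) (by omega)
    have hmin := lcp_min_mono _ _ _ (le_lex _ _ h1) (le_lex _ _ h2)
    have hnext : nextN s i = lcpChars (s.getD i "").toList (s.getD (i+1) "").toList := by
      unfold nextN; rw [if_pos (by omega)]
    have : lcpChars (s.getD i "").toList (s.getD j "").toList
        ≤ lcpChars (s.getD i "").toList (s.getD (i+1) "").toList := by
      rw [hgd i hi, hgd j (by omega), hgd (i+1) (by omega)]
      omega
    unfold mN
    omega

-- the prefix-counter lookup of word i's k-prefix reads 1 exactly when k clears all lcps
theorem getD_iff_mlt (words : List String) (i : Nat)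
    (hi : i < (PySem.List.sorted words (fun w => w) false).length)
    (k : Nat) (hk1 : 1 ≤ k)
    (hkL : k ≤ ((PySem.List.sorted words (fun w => w) false).getD i "").toList.length) :
    ((cntOf words).getD
        (PySem.Str.slice ((PySem.List.sorted words (fun w => w) false).getD i "") none (some (k : Int))) 0 = 1)
      ↔ mN (PySem.List.sorted words (fun w => w) false) i < k := by
  set s := PySem.List.sorted words (fun w => w) false with hs
  set w := s.getD i "" with hw
  set p := PySem.Str.slice w none (some (k : Int)) with hpdef
  have hpl : p.toList = w.toList.take k := toList_slice_take' w k
  have hplen : p.toList.length = k := by rw [hpl, List.length_take]; omega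
  have hpne : p.toList ≠ [] := by
    intro h0; rw [h0] at hplen; simp at hplen; omega
  rw [getD_cntOf words p hpne]
  have hcast : (((words.countP (fun w' => decide (p.toList <+: w'.toList)) : Nat) : Int) = 1)
      ↔ words.countP (fun w' => decide (p.toList <+: w'.toList)) = 1 := by
    constructor
    · intro h; exact_mod_cast h
    · intro h; exact_mod_cast h
  rw [hcast]
  have hperm : words.countP (fun w' => decide (p.toList <+: w'.toList))
      = s.countP (fun w' => decide (p.toList <+: w'.toList)) :=
    (List.Perm.countP_eq _ (PySem.List.sorted_perm words (fun w => w) false)).symm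
  rw [hperm]
  have hgd : s.getD i "" = s[i]'hi := List.getD_eq_getElem s "" hi
  have hself : (fun w' => decide (p.toList <+: w'.toList)) (s[i]'hi) = true := by
    simp only [decide_eq_true_eq]
    rw [← hgd, ← hw, hpl]
    exact List.take_prefix k w.toList
  rw [countP_eq_one_iff s _ i hi hself]
  constructor
  · intro hall
    -- m < k : each component of the max is an lcp with a neighbour (or 0)
    have hcomp : ∀ j, j < s.length → j ≠ i →
        lcpChars w.toList (s.getD j "").toList < k := by
      intro j hjl hjne
      have hfalse := hall j hjl hjne
      simp only [decide_eq_false_iff_not] at hfalse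
      rw [hpl] at hfalse
      rw [List.getD_eq_getElem s "" hjl]
      by_contra hge
      rw [not_lt] at hge
      exact hfalse ((take_prefix_iff_le_lcp k w.toList ((s[j]'hjl).toList) hkL).mpr (by omega))
    unfold mN
    have hprev : prevN s i < k := by
      unfold prevN
      split_ifs with h0
      · exact hcomp (i-1) (by omega) (by omega)
      · omega
    have hnext : nextN s i < k := by
      unfold nextN
      split_ifs with h0
      · exact hcomp (i+1) (by omega) (by omega)
      · omega
    omega
  · intro hm j hjl hjne
    simp only [decide_eq_false_iff_not]
    rw [hpl]
    intro hpre
    have hle := (take_prefix_iff_le_lcp k w.toList ((s[j]'hjl).toList) hkL).mp hpre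
    have hb := lcp_le_mN words i j hi hjl hjne
    rw [← hs] at hb
    rw [← hw] at hb
    rw [List.getD_eq_getElem s "" hjl] at hb
    omega

-- B's search loop returns min(m+1, len) when the counter reads 1 exactly above m
theorem typedLoop_eq (cnt : PySem.Dict String Int) (w : String) (m : Nat)
    (hm : m ≤ w.toList.length)
    (hC : ∀ k, 1 ≤ k → k ≤ w.toList.length →
      (cnt.getD (PySem.Str.slice w none (some (k : Int))) 0 = 1 ↔ m < k)) :
    ∀ rem kk, kk + rem = w.toList.length + 1 → 1 ≤ kk → kk ≤ m + 1 →
    typedLoop cnt w rem kk =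
      if m + 1 ≤ w.toList.length then ((m + 1 : Nat) : Int) else (w.toList.length : Int) := by
  intro rem
  induction rem with
  | zero =>
    intro kk h1 h2 h3
    have hms : m = w.toList.length := by omega
    rw [if_neg (by omega)]
    simp [typedLoop, PySem.Str.len_eq]
  | succ rem ih =>
    intro kk h1 h2 h3
    have hkkL : kk ≤ w.toList.length := by omega
    simp only [typedLoop]
    by_cases hc : m < kk
    · rw [if_pos ((hC kk h2 hkkL).mpr hc)]
      have : kk = m + 1 := by omega
      subst this
      rw [if_pos (by omega)]
    · rw [if_neg (by
        intro hone
        exact hc ((hC kk h2 hkkL).mp hone))]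
      exact ih (kk+1) (by omega) (by omega) (by omega)

-- port A as a sum of per-index terms over the sorted list
theorem A_red (words : List String) :
    solution words =
      ((List.range (PySem.List.sorted words (fun w => w) false).length).map
        (Aterm (PySem.List.sorted words (fun w => w) false))).sum := by
  simp only [solution]
  set s := PySem.List.sorted words (fun w => w) false with hs
  rw [PySem.List.pyRange_one]
  have hn : ((s.length : Int) - 0).toNat = s.length := by omega
  rw [hn, List.foldl_map]
  rw [PySem.List.foldl_congr_mem (g := fun acc (k : Nat) => acc + Aterm s k)]
  · rw [PySem.List.foldl_add]
    simp
  · intro acc k hk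
    rw [List.mem_range] at hk
    have hzk : (0 : Int) + (k : Int) = ((k : Nat) : Int) := by ring
    rw [hzk]
    rw [show PySem.List.pyGetD s ((k : Nat) : Int) "" = s.getD k "" from PySem.List.pyGetD_natCast s k ""]
    set w := s.getD k "" with hw
    set L := w.toList.length with hL
    have hlen : PySem.Str.len w = (L : Int) := by rw [PySem.Str.len_eq]
    have hprevI : (if 0 < (k : Int) then lcpA w (PySem.List.pyGetD s ((k : Int) - 1) "") else 0)
        = ((prevN s k : Nat) : Int) := by
      unfold prevN
      by_cases h0 : 0 < k
      · rw [if_pos (by exact_mod_cast h0), if_pos h0]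
        rw [show (k : Int) - 1 = (((k - 1 : Nat)) : Int) by omega]
        rw [PySem.List.pyGetD_natCast]
        rfl
      · rw [if_neg (by omega), if_neg h0]
        simp
    have hnextI : (if (k : Int) < (s.length : Int) - 1 then lcpA w (PySem.List.pyGetD s ((k : Int) + 1) "") else 0)
        = ((nextN s k : Nat) : Int) := by
      unfold nextN
      by_cases h0 : k + 1 < s.length
      · rw [if_pos (by omega), if_pos h0]
        rw [show (k : Int) + 1 = (((k + 1 : Nat)) : Int) by omega]
        rw [PySem.List.pyGetD_natCast]
        rfl
      · rw [if_neg (by omega), if_neg h0]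
        simp
    rw [hprevI, hnextI, hlen]
    have hpL : prevN s k ≤ L := by
      unfold prevN
      have := lcpChars_le_left w.toList (s.getD (k-1) "").toList
      split_ifs <;> omega
    have hnL : nextN s k ≤ L := by
      unfold nextN
      have := lcpChars_le_left w.toList (s.getD (k+1) "").toList
      split_ifs <;> omega
    unfold Aterm mN
    rw [← hw, ← hL]
    by_cases hcond : prevN s k = L ∨ nextN s k = L
    · rw [if_pos (by
        rcases hcond with h | h
        · exact Or.inl (by exact_mod_cast congrArg (Nat.cast : Nat → Int) h)
        · exact Or.inr (by exact_mod_cast congrArg (Nat.cast : Nat → Int) h))]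
      rw [if_neg (by omega)]
    · rw [not_or] at hcond
      rw [if_neg (by
        rw [not_or]
        exact ⟨fun h => hcond.1 (by exact_mod_cast h), fun h => hcond.2 (by exact_mod_cast h)⟩)]
      rw [if_pos (by omega)]
      push_cast
      omega

-- port B as a sum of per-word terms
theorem B_red (words : List String) :
    solution_alt words =
      (words.map (fun w => typedLoop (cntOf words) w w.toList.length 1)).sum := by
  unfold solution_alt
  rw [cnt_port_eq words]
  rw [PySem.List.foldl_add]
  simp

-- per sorted index, B's per-word value coincides with A's term
theorem typed_eq_Aterm (words : List String) (i : Nat)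
    (hi : i < (PySem.List.sorted words (fun w => w) false).length) :
    typedLoop (cntOf words) ((PySem.List.sorted words (fun w => w) false).getD i "")
      ((PySem.List.sorted words (fun w => w) false).getD i "").toList.length 1
      = Aterm (PySem.List.sorted words (fun w => w) false) i := by
  set s := PySem.List.sorted words (fun w => w) false with hs
  set w := s.getD i "" with hw
  have := typedLoop_eq (cntOf words) w (mN s i) (mN_le_len s i)
    (fun k hk1 hkL => getD_iff_mlt words i hi k hk1 hkL)
    w.toList.length 1 (by omega) (by omega) (by omega)
  rw [this]
  rfl

-- ===== VERDICT (by name: the statement is the Claim_ definition above) =====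
theorem solution_spec : Claim_equal_solution := by
  intro words _
  unfold Spec_solution
  rw [A_red words, B_red words]
  set s := PySem.List.sorted words (fun w => w) false with hs
  have hperm : (words.map (fun w => typedLoop (cntOf words) w w.toList.length 1)).sum
      = (s.map (fun w => typedLoop (cntOf words) w w.toList.length 1)).sum :=
    (List.Perm.sum_eq ((PySem.List.sorted_perm words (fun w => w) false).map _)).symm
  rw [hperm]
  congr 1
  apply List.ext_getElem
  · simp
  · intro i h1 h2
    simp only [List.getElem_map, List.getElem_range]
    have hi : i < s.length := by simpa using h1
    rw [show s[i] = s.getD i "" from (List.getD_eq_getElem s "" hi).symm]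
    exact (typed_eq_Aterm words i hi).symm
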